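-- pv_equiv track=rewrite | github.com/fakeplastictree11/Lab | Light/Scripts/lightFunctions.py | callibration
-- ===== SOURCE A (Python) =====
-- def callibration(rgb):
--     mxr = 0
--     mxb = 0
--     mxlb = 0
--     mxg = 0
--     nmxr = 0
--     nmxg = 0
--     nmxb = 0
--     nmxlb = 0
--     for i in range(len(rgb) - 1):
--         if rgb[i][0] > mxr:
--             mxr = rgb[i][0]
--             nmxr = i
--         if rgb[i][1] > mxg:
--             mxg = rgb[i][1]
--             nmxg = i
--         if rgb[i][2] > mxb:
--             mxb = rgb[i][2]
--             nmxb = i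
--         if rgb[i][2] > mxlb  and 200 < i < 250:
--             mxlb = rgb[i][2]
--             nmxlb = i
--     return [nmxr, nmxg, nmxb, nmxlb]
-- ===== SOURCE B (Python) =====
-- def callibration(rgb):
--     def argmax_first(values):
--         best, bi = 0, 0
--         for i, v in enumerate(values):
--             if v > best:
--                 best, bi = v, i
--         return best, bi
--
--     rows = rgb[:-1]
--     _, r = argmax_first([p[0] for p in rows])
--     _, g = argmax_first([p[1] for p in rows])
--     _, b = argmax_first([p[2] for p in rows])
--     lb_best, lb_i = argmax_first([p[2] for p in rows[201:250]])
--     return [r, g, b, 201 + lb_i if lb_best > 0 else 0]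
-- ===== Notes on version B (the rewrite author's own statement) =====
-- stated objective: simpler
-- what changed: A's single loop interleaving four max-tracking branches over indices is replaced by one reusable argmax_first helper applied independently to each channel column of rgb[:-1] and to the rows[201:250] window (with the 201 offset added back when a positive value exists).
import Mathlib
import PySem

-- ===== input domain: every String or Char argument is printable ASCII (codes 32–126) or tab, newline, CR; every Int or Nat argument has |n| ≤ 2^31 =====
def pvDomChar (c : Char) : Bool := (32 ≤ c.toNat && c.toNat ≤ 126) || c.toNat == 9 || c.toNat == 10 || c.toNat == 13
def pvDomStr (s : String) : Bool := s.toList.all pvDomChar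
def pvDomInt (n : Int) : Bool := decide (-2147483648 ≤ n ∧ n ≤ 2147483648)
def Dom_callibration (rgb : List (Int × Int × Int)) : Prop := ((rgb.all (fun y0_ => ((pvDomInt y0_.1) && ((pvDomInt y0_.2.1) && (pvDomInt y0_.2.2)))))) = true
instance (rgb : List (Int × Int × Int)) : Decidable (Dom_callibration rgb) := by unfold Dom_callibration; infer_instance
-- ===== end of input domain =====

-- B replaces A's single interleaved four-branch loop by one reusable first-argmax helper
-- applied per channel column (and to the rows[201:250] window for the last entry): simpler decomposition, same values.

-- ===== PORT A =====
-- the eight loop variables of A as one record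
structure CalSt where
  mxr : Int
  nmxr : Int
  mxg : Int
  nmxg : Int
  mxb : Int
  nmxb : Int
  mxlb : Int
  nmxlb : Int
deriving DecidableEq, Repr

-- loop body of A: the four `if`s, in order, on rgb[i]
def callibrationStep (rgb : List (Int × Int × Int)) (s : CalSt) (i : Int) : CalSt :=
  let p := PySem.List.pyGetD rgb i (0, 0, 0)   -- rgb[i]; i is always in range in A's loop
  let s := if p.1 > s.mxr then { s with mxr := p.1, nmxr := i } else s
  let s := if p.2.1 > s.mxg then { s with mxg := p.2.1, nmxg := i } else s
  let s := if p.2.2 > s.mxb then { s with mxb := p.2.2, nmxb := i } else s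
  let s := if p.2.2 > s.mxlb ∧ (200 < i ∧ i < 250) then { s with mxlb := p.2.2, nmxlb := i } else s
  s

def callibration (rgb : List (Int × Int × Int)) : List Int :=
  let s := (PySem.List.pyRange 0 (PySem.List.len rgb - 1)).foldl (callibrationStep rgb)
    ⟨0, 0, 0, 0, 0, 0, 0, 0⟩
  [s.nmxr, s.nmxg, s.nmxb, s.nmxlb]

-- ===== PORT B =====
-- argmax_first(values): (best, bi) with a 0 floor and first-occurrence ties, via enumerate
def argmaxFirst (values : List Int) : Int × Int :=
  (PySem.List.enumerate values).foldl (fun s vi => if vi.2 > s.1 then (vi.2, vi.1) else s) (0, 0)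

def callibration_alt (rgb : List (Int × Int × Int)) : List Int :=
  let rows := PySem.List.slice rgb none (some (-1))        -- rgb[:-1]
  let r := argmaxFirst (rows.map (fun p => p.1))
  let g := argmaxFirst (rows.map (fun p => p.2.1))
  let b := argmaxFirst (rows.map (fun p => p.2.2))
  let lb := argmaxFirst ((PySem.List.slice rows (some 201) (some 250)).map (fun p => p.2.2))
  [r.2, g.2, b.2, if lb.1 > 0 then 201 + lb.2 else 0]

-- ===== PRECONDITION & SPEC =====
def Spec_callibration (rgb : List (Int × Int × Int)) (out : List Int) : Prop := out = callibration_alt rgb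
instance (rgb : List (Int × Int × Int)) (out : List Int) : Decidable (Spec_callibration rgb out) := by unfold Spec_callibration; infer_instance

-- ===== CLAIM (what is proved, stated in full; the proofs are below) =====
def Claim_equal_callibration : Prop := ∀ (rgb : List (Int × Int × Int)), Dom_callibration rgb → Spec_callibration rgb (callibration rgb)

-- ===== LEMMAS AND PROOFS =====

-- B's per-window argmax state mapped back to A's (mxlb, nmxlb) pair
def lbPair (s : Int × Int) : Int × Int := (s.1, if s.1 > 0 then 201 + s.2 else 0)

-- A's loop body on an explicit record: each field gets its own independent `if`
theorem step_mk (rgb : List (Int × Int × Int)) (i a b c d e f g h : Int) :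
    callibrationStep rgb ⟨a,b,c,d,e,f,g,h⟩ i =
      let p := PySem.List.pyGetD rgb i (0, 0, 0)
      ⟨if p.1 > a then p.1 else a, if p.1 > a then i else b,
       if p.2.1 > c then p.2.1 else c, if p.2.1 > c then i else d,
       if p.2.2 > e then p.2.2 else e, if p.2.2 > e then i else f,
       if p.2.2 > g ∧ (200 < i ∧ i < 250) then p.2.2 else g,
       if p.2.2 > g ∧ (200 < i ∧ i < 250) then i else h⟩ := by
  simp only [callibrationStep]
  split_ifs <;> simp_all

theorem argmaxAux_fst_le (l : List (Int × Int)) (s : Int × Int) :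
    s.1 ≤ (l.foldl (fun s vi => if vi.2 > s.1 then (vi.2, vi.1) else s) s).1 := by
  induction l generalizing s with
  | nil => simp
  | cons x t ih =>
    simp only [List.foldl_cons]
    refine le_trans ?_ (ih _)
    split <;> omega

theorem argmaxFirst_fst_nonneg (vs : List Int) : 0 ≤ (argmaxFirst vs).1 :=
  argmaxAux_fst_le (PySem.List.enumerate vs) (0, 0)

-- appending one value of known position to argmax_first's input
theorem argmaxFirst_concat (vs : List Int) (v : Int) :
    argmaxFirst (vs ++ [v]) =
      if v > (argmaxFirst vs).1 then (v, (vs.length : Int)) else argmaxFirst vs := by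
  simp [argmaxFirst, PySem.List.enumerate_append, List.foldl_append, PySem.List.enumerate]

-- rgb[:-1]
theorem slice_neg_one (xs : List (Int × Int × Int)) :
    PySem.List.slice xs none (some (-1)) = xs.take (xs.length - 1) := by
  simp [PySem.List.slice]

-- rows[201:250]
theorem slice_window (xs : List (Int × Int × Int)) :
    PySem.List.slice xs (some 201) (some 250) = (xs.drop 201).take 49 := by
  simp [PySem.List.slice]
  by_cases h : xs.length ≤ 201
  · rw [min_eq_right h, List.drop_eq_nil_of_le (le_refl _), List.drop_eq_nil_of_le (by omega)]
    simp
  · rw [min_eq_left (by omega : 201 ≤ xs.length)]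
    by_cases h2 : xs.length ≤ 250
    · rw [min_eq_right h2, List.take_of_length_le (by simp), List.take_of_length_le (by simp; omega)]
    · rw [min_eq_left (by omega), show (250 - 201 : Nat) = 49 from rfl]

-- A's loop over the first n indices computes the four per-channel first argmaxes of the first n rows
theorem loop_eq (rgb : List (Int × Int × Int)) (n : Nat) (hn : n ≤ rgb.length) :
    (List.range n).foldl (fun s (k : Nat) => callibrationStep rgb s (k : Int)) ⟨0, 0, 0, 0, 0, 0, 0, 0⟩ =
      { mxr := (argmaxFirst ((rgb.take n).map (fun p => p.1))).1
        nmxr := (argmaxFirst ((rgb.take n).map (fun p => p.1))).2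
        mxg := (argmaxFirst ((rgb.take n).map (fun p => p.2.1))).1
        nmxg := (argmaxFirst ((rgb.take n).map (fun p => p.2.1))).2
        mxb := (argmaxFirst ((rgb.take n).map (fun p => p.2.2))).1
        nmxb := (argmaxFirst ((rgb.take n).map (fun p => p.2.2))).2
        mxlb := (lbPair (argmaxFirst ((((rgb.take n).drop 201).take 49).map (fun p => p.2.2)))).1
        nmxlb := (lbPair (argmaxFirst ((((rgb.take n).drop 201).take 49).map (fun p => p.2.2)))).2 } := by
  induction n with
  | zero => simp [argmaxFirst, lbPair]
  | succ n ih =>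
    have hlt : n < rgb.length := by omega
    rw [List.range_succ, List.foldl_append, ih (by omega), List.foldl_cons, List.foldl_nil, step_mk]
    have htake : rgb.take (n + 1) = rgb.take n ++ [rgb[n]] := by
      rw [List.take_add_one]; simp [List.getElem?_eq_getElem hlt]
    have hget : PySem.List.pyGetD rgb (n : Int) (0, 0, 0) = rgb[n] := by
      rw [PySem.List.pyGetD_natCast, List.getD_eq_getElem?_getD, List.getElem?_eq_getElem hlt]; rfl
    have hlenmap : ∀ f : (Int × Int × Int) → Int, ((rgb.take n).map f).length = n := by
      intro f; simp [List.length_take]; omega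
    rw [htake, hget]
    simp only [List.map_append, List.map_cons, List.map_nil]
    rw [argmaxFirst_concat, argmaxFirst_concat, argmaxFirst_concat, hlenmap, hlenmap, hlenmap]
    clear ih
    by_cases h201 : n + 1 ≤ 201
    · -- window still empty on both sides; A's 200 < i test is false
      have w1 : (rgb.take (n+1)).drop 201 = [] :=
        List.drop_eq_nil_of_le (by simp [List.length_take]; omega)
      have w0 : (rgb.take n).drop 201 = [] :=
        List.drop_eq_nil_of_le (by simp [List.length_take]; omega)
      rw [← htake, w1, w0]
      have hcond : ¬((200:Int) < (n:Int) ∧ (n:Int) < 250) := by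
        rintro ⟨h1, -⟩; omega
      simp only [CalSt.mk.injEq, lbPair, apply_ite Prod.fst, apply_ite Prod.snd]
      refine ⟨?_, ?_, ?_, ?_, ?_, ?_, ?_, ?_⟩ <;>
        first | trivial | (split <;> rename_i h <;> first | rfl | exact absurd h.2 hcond)
    · by_cases h250 : n < 250
      · -- the window gains rgb[n] at offset n - 201; A's test fires on the same condition
        have hw : ((rgb.take (n+1)).drop 201).take 49 =
            ((rgb.take n).drop 201).take 49 ++ [rgb[n]] := by
          rw [htake, List.drop_append_of_le_length (by simp [List.length_take]; omega),
            List.take_of_length_le (l := (rgb.take n).drop 201 ++ [rgb[n]]) (by simp [List.length_take]; omega),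
            List.take_of_length_le (l := (rgb.take n).drop 201) (by simp [List.length_take]; omega)]
        have hwlen : ((((rgb.take n).drop 201).take 49).map (fun p : Int × Int × Int => p.2.2)).length
            = n - 201 := by
          simp [List.length_take, List.length_drop]; omega
        rw [← htake, hw]
        simp only [List.map_append, List.map_cons, List.map_nil]
        rw [argmaxFirst_concat, hwlen]
        have hnn := argmaxFirst_fst_nonneg ((((rgb.take n).drop 201).take 49).map (fun p : Int × Int × Int => p.2.2))
        have hcond : ((200:Int) < (n:Int) ∧ (n:Int) < 250) := by constructor <;> omega
        simp only [CalSt.mk.injEq, lbPair, hcond, and_true, apply_ite Prod.fst,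
          apply_ite Prod.snd]
        refine ⟨?_, ?_, ?_, ?_, ?_, ?_, ?_, ?_⟩ <;>
          first | trivial | (split <;> first | rfl | omega)
      · -- window already full and frozen; A's i < 250 test is false
        have hw : ((rgb.take (n+1)).drop 201).take 49 = ((rgb.take n).drop 201).take 49 := by
          rw [htake, List.drop_append_of_le_length (by simp [List.length_take]; omega),
            List.take_append_of_le_length (by simp [List.length_take, List.length_drop]; omega)]
        have hcond : ¬((200:Int) < (n:Int) ∧ (n:Int) < 250) := by
          rintro ⟨-, h2⟩; omega
        rw [← htake, hw]
        simp only [CalSt.mk.injEq, lbPair, apply_ite Prod.fst, apply_ite Prod.snd]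
        refine ⟨?_, ?_, ?_, ?_, ?_, ?_, ?_, ?_⟩ <;>
          first | trivial | (split <;> rename_i h <;> first | rfl | exact absurd h.2 hcond)

-- ===== VERDICT (by name: the statement is the Claim_ definition above) =====
theorem callibration_spec : Claim_equal_callibration := by
  unfold Claim_equal_callibration
  intro rgb _
  unfold Spec_callibration
  cases rgb with
  | nil => rfl
  | cons x t =>
    simp only [callibration, callibration_alt, slice_neg_one, slice_window]
    have hlen : PySem.List.len (x :: t) - 1 = ((t.length : Nat) : Int) := by
      simp [PySem.List.len]
    rw [hlen, PySem.List.pyRange_zero_natCast, List.foldl_map,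
      loop_eq (x :: t) t.length (by simp), show (x :: t).length - 1 = t.length from by simp]
    simp [lbPair]
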